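-- pv_equiv track=rewrite | github.com/PatzD/python_lasoft_PatrykD_homework | statements_syntax/main.py | task_24
-- ===== SOURCE A (Python) =====
-- def task_24(og_array):
--     """
--     check whether array contains a 3 next to a 3 or a 5 next to a 5 but not both
--     """
--     threes = False
--     fives = False
--     for i in range(len(og_array) - 1):
--         if og_array[i] == 3 and og_array[i + 1] == 3:
--             threes = True
--         if og_array[i] == 5 and og_array[i + 1] == 5:
--             fives = True
--     if threes and fives:
--         raise ValueError('Array contains both 3 and 5 next to each other')
--     return threes or fives
-- ===== SOURCE B (Python) =====
-- def task_24(og_array):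
--     """
--     check whether array contains a 3 next to a 3 or a 5 next to a 5 but not both
--     """
--     # stage 1: run-length-encode the array into (value, count) groups
--     groups = []
--     i = 0
--     n = len(og_array)
--     while i < n:
--         j = i
--         while j < n and og_array[j] == og_array[i]:
--             j += 1
--         groups.append((og_array[i], j - i))
--         i = j
--     # stage 2: a value is adjacent to itself iff some run of it has length >= 2
--     threes = any(v == 3 and c >= 2 for v, c in groups)
--     fives = any(v == 5 and c >= 2 for v, c in groups)
--     if threes and fives:
--         raise ValueError('Array contains both 3 and 5 next to each other')
--     return threes or fives
-- ===== Notes on version B (the rewrite author's own statement) =====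
-- stated objective: alternative
-- what changed: Replaces A's single pairwise index scan with a staged run-length-grouping algorithm: first build the list of (value, run-length) groups of consecutive equal elements, then flag 3s/5s by asking whether any group with that value has length >= 2; the both->raise/else->or combining logic is kept.
import Mathlib
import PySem

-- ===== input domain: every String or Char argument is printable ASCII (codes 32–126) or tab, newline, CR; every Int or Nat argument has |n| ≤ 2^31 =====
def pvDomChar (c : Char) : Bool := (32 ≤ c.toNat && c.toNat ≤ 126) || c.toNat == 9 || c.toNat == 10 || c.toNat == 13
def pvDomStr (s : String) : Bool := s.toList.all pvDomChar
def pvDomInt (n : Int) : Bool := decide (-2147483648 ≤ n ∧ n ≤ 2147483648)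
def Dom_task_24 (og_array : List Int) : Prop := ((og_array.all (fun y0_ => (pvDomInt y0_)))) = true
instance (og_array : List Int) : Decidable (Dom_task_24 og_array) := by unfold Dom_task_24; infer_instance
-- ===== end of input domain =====

-- B replaces A's pairwise index scan with a staged run-length-grouping algorithm:
-- build (value, run-length) groups first, then flag a value iff one of its runs has
-- length >= 2 (objective: alternative, same cost).

-- ===== PORT A =====
-- for i in range(len(og_array)-1): pairwise check of og_array[i], og_array[i+1]
def task_24 (og_array : List Int) : Bool :=
  let st := (PySem.List.pyRange 0 ((og_array.length : Int) - 1) 1).foldl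
    (fun (s : Bool × Bool) i =>
      let t := if PySem.List.pyGet? og_array i = some 3 ∧ PySem.List.pyGet? og_array (i + 1) = some 3 then true else s.1
      let f := if PySem.List.pyGet? og_array i = some 5 ∧ PySem.List.pyGet? og_array (i + 1) = some 5 then true else s.2
      (t, f))
    (false, false)
  -- the raising branch (st.1 ∧ st.2) is excluded by Pre_task_24
  st.1 || st.2

-- ===== PORT B =====
-- Source B's outer while-loop: each iteration consumes one maximal run of equal elements
-- (the inner while advancing j is the takeWhile/dropWhile split) and records (value, length)
def rle (l : List Int) : List (Int × Nat) :=
  match l with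
  | [] => []
  | x :: xs =>
      (x, (xs.takeWhile (· == x)).length + 1) :: rle (xs.dropWhile (· == x))
termination_by l.length
decreasing_by
  simp only [List.length_cons]
  exact Nat.lt_succ_of_le (List.length_dropWhile_le _ _)

def task_24_alt (og_array : List Int) : Bool :=
  let groups := rle og_array
  let threes := groups.any (fun g => g.1 == 3 && decide (2 ≤ g.2))
  let fives := groups.any (fun g => g.1 == 5 && decide (2 ≤ g.2))
  -- the raising branch (threes ∧ fives) is excluded by Pre_task_24
  threes || fives

-- ===== PRECONDITION & SPEC =====
-- Pre_ excludes exactly the inputs with both an adjacent pair of 3s and an adjacent pair of 5s,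
-- on which the Python A (and B) raise ValueError.
def Pre_task_24 (og_array : List Int) : Prop :=
  ¬ (((og_array.zip og_array.tail).any (fun p => p.1 == 3 && p.2 == 3)) = true ∧
     ((og_array.zip og_array.tail).any (fun p => p.1 == 5 && p.2 == 5)) = true)
instance (og_array : List Int) : Decidable (Pre_task_24 og_array) := by unfold Pre_task_24; infer_instance

def pvWitness_task_24 : List Int := ([3, 3, 5])

def Spec_task_24 (og_array : List Int) (out : Bool) : Prop := out = task_24_alt og_array
instance (og_array : List Int) (out : Bool) : Decidable (Spec_task_24 og_array out) := by unfold Spec_task_24; infer_instance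

-- ===== CLAIM (what is proved, stated in full; the proofs are below) =====
def Claim_equal_task_24 : Prop := ∀ (og_array : List Int), Dom_task_24 og_array → Pre_task_24 og_array → Spec_task_24 og_array (task_24 og_array)

-- ===== LEMMAS AND PROOFS =====

-- the adjacency Boolean both characterisations are phrased with
def adjB (v : Int) (xs : List Int) : Bool := (xs.zip xs.tail).any (fun p => p.1 == v && p.2 == v)

-- recursive form of adjB
def adjR (v : Int) : List Int → Bool
  | x :: y :: r => (x == v && y == v) || adjR v (y :: r)
  | _ => false

lemma adjB_eq_adjR (v : Int) (xs : List Int) : adjB v xs = adjR v xs := by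
  induction xs with
  | nil => rfl
  | cons x xs ih =>
    cases xs with
    | nil => rfl
    | cons y r =>
      simp only [adjB, List.tail_cons, List.zip_cons_cons, List.any_cons, adjR] at *
      rw [← ih]

-- A's index range, mapped through double indexing, is exactly the list of adjacent pairs
lemma map_idx_pairs (xs : List Int) :
    (PySem.List.pyRange 0 ((xs.length : Int) - 1) 1).map
      (fun i => (PySem.List.pyGet? xs i, PySem.List.pyGet? xs (i + 1)))
    = (xs.zip xs.tail).map (fun p => (some p.1, some p.2)) := by
  apply List.ext_getElem
  · simp only [List.length_map, PySem.List.length_pyRange_one, List.length_zip, List.length_tail]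
    omega
  · intro k h1 h2
    have h1' : k < (PySem.List.pyRange 0 ((xs.length : Int) - 1) 1).length := by
      simp [PySem.List.length_pyRange_one]; simp at h1; omega
    have hk : k + 1 < xs.length := by
      simp only [PySem.List.length_pyRange_one] at h1'; omega
    have hget : (PySem.List.pyRange 0 ((xs.length : Int) - 1) 1)[k]'h1' = (k : Int) := by
      simp [PySem.List.getElem_pyRange_one]
    have e1 : PySem.List.pyGet? xs (k : Int) = some (xs[k]'(by omega)) := by
      rw [PySem.List.pyGet?_natCast, List.getElem?_eq_getElem (by omega)]
    have e2 : PySem.List.pyGet? xs ((k : Int) + 1) = some (xs[k + 1]'hk) := by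
      have hc : (k : Int) + 1 = ((k + 1 : Nat) : Int) := by push_cast; ring
      rw [hc, PySem.List.pyGet?_natCast, List.getElem?_eq_getElem hk]
    simp only [List.getElem_map, hget, e1, e2, List.getElem_zip]
    congr 1
    simp [List.getElem_tail]

-- a pairwise Boolean-flag fold is 'any'
lemma pairfold_any (l : List (Int × Int)) (t f : Bool) :
    l.foldl (fun (s : Bool × Bool) p =>
        (if p.1 = 3 ∧ p.2 = 3 then true else s.1,
         if p.1 = 5 ∧ p.2 = 5 then true else s.2)) (t, f)
    = (t || l.any (fun p => p.1 == 3 && p.2 == 3),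
       f || l.any (fun p => p.1 == 5 && p.2 == 5)) := by
  induction l generalizing t f with
  | nil => simp
  | cons p l ih =>
    simp only [List.foldl_cons, List.any_cons, ih]
    simp only [Prod.mk.injEq]
    constructor <;> split_ifs with h
    · simp [h.1, h.2]
    · by_cases h1 : p.1 = 3
      · have h2 : ¬p.2 = 3 := fun hh => h ⟨h1, hh⟩
        simp [beq_false_of_ne h2]
      · simp [beq_false_of_ne h1]
    · simp [h.1, h.2]
    · by_cases h1 : p.1 = 5
      · have h2 : ¬p.2 = 5 := fun hh => h ⟨h1, hh⟩
        simp [beq_false_of_ne h2]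
      · simp [beq_false_of_ne h1]

lemma A_char (xs : List Int) : task_24 xs = (adjB 3 xs || adjB 5 xs) := by
  unfold task_24 adjB
  have hm := map_idx_pairs xs
  have : (PySem.List.pyRange 0 ((xs.length : Int) - 1) 1).foldl
      (fun (s : Bool × Bool) i =>
        (if PySem.List.pyGet? xs i = some 3 ∧ PySem.List.pyGet? xs (i + 1) = some 3 then true else s.1,
         if PySem.List.pyGet? xs i = some 5 ∧ PySem.List.pyGet? xs (i + 1) = some 5 then true else s.2))
      (false, false)
      = (xs.zip xs.tail).foldl
        (fun (s : Bool × Bool) p =>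
          (if p.1 = 3 ∧ p.2 = 3 then true else s.1,
           if p.1 = 5 ∧ p.2 = 5 then true else s.2)) (false, false) := by
    have h1 : (PySem.List.pyRange 0 ((xs.length : Int) - 1) 1).foldl
        (fun (s : Bool × Bool) i =>
          (if PySem.List.pyGet? xs i = some 3 ∧ PySem.List.pyGet? xs (i + 1) = some 3 then true else s.1,
           if PySem.List.pyGet? xs i = some 5 ∧ PySem.List.pyGet? xs (i + 1) = some 5 then true else s.2))
        (false, false)
        = ((PySem.List.pyRange 0 ((xs.length : Int) - 1) 1).map
            (fun i => (PySem.List.pyGet? xs i, PySem.List.pyGet? xs (i + 1)))).foldl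
          (fun (s : Bool × Bool) q =>
            (if q.1 = some 3 ∧ q.2 = some 3 then true else s.1,
             if q.1 = some 5 ∧ q.2 = some 5 then true else s.2)) (false, false) := by
      rw [List.foldl_map]
    rw [h1, hm, List.foldl_map]
    simp
  simp only [this, pairfold_any, Bool.false_or]

-- peeling one maximal run off the front of a nonempty list
lemma adjR_run (v x : Int) (xs : List Int) :
    adjR v (x :: xs)
      = ((x == v && decide (1 ≤ (xs.takeWhile (· == x)).length))
          || adjR v (xs.dropWhile (· == x))) := by
  induction xs generalizing x with
  | nil => simp [adjR]
  | cons y ys ih =>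
    by_cases hyx : y = x
    · subst hyx
      have ht : ((y :: ys).takeWhile (· == y)) = y :: ys.takeWhile (· == y) := by
        simp
      have hd : ((y :: ys).dropWhile (· == y)) = ys.dropWhile (· == y) := by
        simp
      rw [ht, hd]
      simp only [adjR, ih y]
      by_cases hv : y = v
      · subst hv
        simp [List.length_cons]
      · simp [beq_false_of_ne hv]
    · have ht : ((y :: ys).takeWhile (· == x)) = [] := by
        simp [beq_false_of_ne hyx]
      have hd : ((y :: ys).dropWhile (· == x)) = y :: ys := by
        simp [beq_false_of_ne hyx]
      rw [ht, hd]
      simp only [adjR, List.length_nil]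
      have hxy : (x == v && y == v) = false := by
        by_cases hv : x = v
        · have : ¬y = v := fun h => hyx (h.trans hv.symm)
          simp [beq_false_of_ne this]
        · simp [beq_false_of_ne hv]
      simp [hxy]

-- a value is adjacent to itself iff one of its run-length groups has length >= 2
lemma rle_any (v : Int) (l : List Int) :
    (rle l).any (fun g => g.1 == v && decide (2 ≤ g.2)) = adjR v l := by
  induction l using rle.induct with
  | case1 => simp [rle, adjR]
  | case2 x xs ih =>
    rw [rle, List.any_cons, ih, adjR_run]
    congr 1
    congr 1
    simp only [decide_eq_decide]
    omega

lemma B_char (xs : List Int) : task_24_alt xs = (adjB 3 xs || adjB 5 xs) := by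
  unfold task_24_alt
  simp only []
  rw [adjB_eq_adjR, adjB_eq_adjR, rle_any, rle_any]

-- ===== VERDICT (by name: the statement is the Claim_ definition above) =====
theorem task_24_spec : Claim_equal_task_24 := by
  intro og _ _
  unfold Spec_task_24
  rw [A_char, B_char]
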